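-- pv_equiv track=rewrite | github.com/riko-py-mk/stock_skills | src/core/scenario_analysis.py | _infer_currency
-- ===== SOURCE A (Python) =====
-- _SUFFIX_TO_CURRENCY = {
--     ".T": "JPY",
--     ".SI": "SGD",
--     ".BK": "THB",
--     ".KL": "MYR",
--     ".JK": "IDR",
--     ".PS": "PHP",
-- }
--
-- def _infer_currency(symbol: str, stock_info: dict) -> str:
--     """銘柄の通貨を推定する。stock_info['currency'] があればそちら優先。"""
--     currency = stock_info.get("currency")
--     if currency:
--         return currency
--     for suffix, cur in _SUFFIX_TO_CURRENCY.items():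
--         if symbol.endswith(suffix):
--             return cur
--     # サフィックスなし → USD と推定
--     return "USD"
-- ===== SOURCE B (Python) =====
-- _SUFFIX_TO_CURRENCY = {
--     ".T": "JPY",
--     ".SI": "SGD",
--     ".BK": "THB",
--     ".KL": "MYR",
--     ".JK": "IDR",
--     ".PS": "PHP",
-- }
--
-- def _infer_currency(symbol: str, stock_info: dict) -> str:
--     """Infer the currency: stock_info['currency'] wins; else look up the symbol's trailing '.suffix'."""
--     currency = stock_info.get("currency")
--     if currency:
--         return currency
--     idx = symbol.rfind(".")
--     suffix = symbol[idx:] if idx != -1 else ""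
--     return _SUFFIX_TO_CURRENCY.get(suffix, "USD")
-- ===== Notes on version B (the rewrite author's own statement) =====
-- stated objective: idiomatic
-- what changed: Instead of scanning the suffix table and testing endswith for each entry, B derives the symbol's trailing suffix once via rfind('.')/slice and does a single dict lookup with a 'USD' default.
import Mathlib
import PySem

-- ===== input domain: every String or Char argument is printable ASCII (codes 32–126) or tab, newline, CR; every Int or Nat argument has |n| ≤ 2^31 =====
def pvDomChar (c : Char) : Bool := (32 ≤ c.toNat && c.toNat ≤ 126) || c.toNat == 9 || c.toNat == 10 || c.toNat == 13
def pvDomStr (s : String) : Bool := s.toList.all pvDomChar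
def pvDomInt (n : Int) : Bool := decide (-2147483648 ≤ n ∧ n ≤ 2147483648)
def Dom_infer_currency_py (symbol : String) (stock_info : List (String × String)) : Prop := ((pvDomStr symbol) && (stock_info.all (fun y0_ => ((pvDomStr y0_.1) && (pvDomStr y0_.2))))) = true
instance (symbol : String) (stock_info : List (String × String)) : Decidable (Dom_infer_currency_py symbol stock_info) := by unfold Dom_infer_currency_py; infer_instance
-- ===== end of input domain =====

-- B replaces A's scan of the suffix table (endswith per entry) by computing the symbol's
-- trailing '.suffix' once with rfind and doing a single dict lookup (objective: idiomatic).

-- ===== PORT A =====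
-- the module-level _SUFFIX_TO_CURRENCY table, as an insertion-ordered association list
def pvSuffixCurrency : List (String × String) :=
  [(".T", "JPY"), (".SI", "SGD"), (".BK", "THB"), (".KL", "MYR"), (".JK", "IDR"), (".PS", "PHP")]

-- A's 'for suffix, cur in _SUFFIX_TO_CURRENCY.items(): if symbol.endswith(suffix): return cur'
def pvSuffixLoop (symbol : String) : List (String × String) → String
  | [] => "USD"
  | (suf, cur) :: rest => if PySem.Str.endswith symbol suf then cur else pvSuffixLoop symbol rest

def infer_currency_py (symbol : String) (stock_info : List (String × String)) : String :=
  match (PySem.Dict.mk stock_info).get? "currency" with   -- stock_info.get("currency")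
  | some c => if c ≠ "" then c                            -- 'if currency:' (non-empty string is truthy)
              else pvSuffixLoop symbol pvSuffixCurrency
  | none => pvSuffixLoop symbol pvSuffixCurrency

-- ===== PORT B =====
-- B's body after the 'currency' early return: rfind / slice / one dict lookup
def pvAltTail (symbol : String) : String :=
  let idx := PySem.Str.rfind symbol "."
  let suffix := if idx ≠ -1 then PySem.Str.slice symbol (some idx) none else ""
  (PySem.Dict.mk pvSuffixCurrency).getD suffix "USD"

def infer_currency_py_alt (symbol : String) (stock_info : List (String × String)) : String :=
  match (PySem.Dict.mk stock_info).get? "currency" with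
  | some c => if c ≠ "" then c else pvAltTail symbol
  | none => pvAltTail symbol

-- ===== PRECONDITION & SPEC =====
def Spec_infer_currency_py (symbol : String) (stock_info : List (String × String)) (out : String) : Prop := out = infer_currency_py_alt symbol stock_info
instance (symbol : String) (stock_info : List (String × String)) (out : String) : Decidable (Spec_infer_currency_py symbol stock_info out) := by unfold Spec_infer_currency_py; infer_instance

-- ===== CLAIM (what is proved, stated in full; the proofs are below) =====
def Claim_equal_infer_currency_py : Prop := ∀ (symbol : String) (stock_info : List (String × String)), Dom_infer_currency_py symbol stock_info → Spec_infer_currency_py symbol stock_info (infer_currency_py symbol stock_info)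

-- ===== LEMMAS AND PROOFS =====

-- rfind.go with a single-character needle ignores an appended character while the fuel stays below it
theorem pv_go_append (ys : List Char) (c : Char) (m : Nat) (hm : m < ys.length) :
    PySem.Chars.rfind.go (ys ++ [c]) ['.'] m = PySem.Chars.rfind.go ys ['.'] m := by
  induction m with
  | zero =>
      cases ys with
      | nil => simp at hm
      | cons y t => simp [PySem.Chars.rfind.go, List.isPrefixOf]
  | succ j ih =>
      have hj : j < ys.length := Nat.lt_of_succ_lt hm
      have hdrop : (ys ++ [c]).drop (j + 1) = ys.drop (j + 1) ++ [c] :=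
        List.drop_append_of_le_length (by omega)
      have hne : ys.drop (j + 1) ≠ [] := by
        intro h
        have := List.drop_eq_nil_iff.mp h
        omega
      obtain ⟨d, t, hdt⟩ := List.exists_cons_of_ne_nil hne
      simp [PySem.Chars.rfind.go, hdrop, hdt, List.isPrefixOf, ih hj]

-- Python's s.rfind('.') peels appended characters one by one
theorem pv_rfind_append (ys : List Char) (c : Char) :
    PySem.Chars.rfind (ys ++ [c]) ['.'] =
      if c = '.' then (ys.length : Int) else PySem.Chars.rfind ys ['.'] := by
  unfold PySem.Chars.rfind
  have hlen : (ys ++ [c]).length = ys.length + 1 := by simp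
  rw [hlen]
  have htop : PySem.Chars.rfind.go (ys ++ [c]) ['.'] (ys.length + 1) =
      PySem.Chars.rfind.go (ys ++ [c]) ['.'] ys.length := by
    simp [PySem.Chars.rfind.go]
  rw [htop]
  by_cases h : c = '.'
  · cases ys with
    | nil => simp [PySem.Chars.rfind.go, List.isPrefixOf, h]
    | cons y t => simp [PySem.Chars.rfind.go, List.isPrefixOf, h]
  · have h' : ¬ ('.' = c) := fun hh => h hh.symm
    cases ys with
    | nil => simp [PySem.Chars.rfind.go, List.isPrefixOf, h, h']
    | cons y t =>
        have hgo : PySem.Chars.rfind.go ((y :: t) ++ [c]) ['.'] (t.length + 1) =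
            PySem.Chars.rfind.go ((y :: t) ++ [c]) ['.'] t.length := by
          simp [PySem.Chars.rfind.go, List.isPrefixOf, h']
        have hlow : PySem.Chars.rfind.go ((y :: t) ++ [c]) ['.'] t.length =
            PySem.Chars.rfind.go (y :: t) ['.'] t.length := pv_go_append _ _ _ (by simp)
        have htop' : PySem.Chars.rfind.go (y :: t) ['.'] (t.length + 1) =
            PySem.Chars.rfind.go (y :: t) ['.'] t.length := by
          simp [PySem.Chars.rfind.go]
        simp only [List.length_cons, hgo, hlow, htop', h, if_false]

-- characterization of rfind('.'): either no dot, or the string splits at its last dot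
theorem pv_rfind_char (cs : List Char) :
    (PySem.Chars.rfind cs ['.'] = -1 ∧ '.' ∉ cs) ∨
    (∃ ys zs, cs = ys ++ '.' :: zs ∧ '.' ∉ zs ∧ PySem.Chars.rfind cs ['.'] = (ys.length : Int)) := by
  induction cs using List.reverseRecOn with
  | nil =>
      left
      refine ⟨?_, ?_⟩
      · simp [PySem.Chars.rfind, PySem.Chars.rfind.go, List.isPrefixOf]
      · simp
  | append_singleton ys c ih =>
      by_cases hc : c = '.'
      · right
        exact ⟨ys, [], by simp [hc], by simp, by rw [pv_rfind_append]; simp [hc]⟩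
      · rcases ih with ⟨h1, h2⟩ | ⟨as, zs, heq, hz, hr⟩
        · left
          refine ⟨by rw [pv_rfind_append]; simp [hc, h1], ?_⟩
          simp only [List.mem_append, List.mem_singleton]
          rintro (h | h)
          · exact h2 h
          · exact hc h.symm
        · right
          refine ⟨as, zs ++ [c], by simp [heq], ?_, by rw [pv_rfind_append]; simp [hc, hr]⟩
          simp only [List.mem_append, List.mem_singleton]
          rintro (h | h)
          · exact hz h
          · exact hc h.symm

-- a dotless candidate suffix matches a '.'-headed tail exactly when they are equal
theorem pv_suffix_key (t zs w : List Char) (ht : '.' ∉ t) (hz : '.' ∉ zs) :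
    ((t ++ ['.']) <+: (zs ++ '.' :: w)) ↔ t = zs := by
  induction t generalizing zs with
  | nil =>
      cases zs with
      | nil => simp
      | cons z zt =>
          simp only [List.nil_append, List.cons_append]
          constructor
          · intro h
            have : '.' = z := (List.cons_prefix_cons.mp h).1
            exact absurd this.symm (by intro hzz; exact hz (hzz ▸ List.mem_cons_self))
          · intro h; exact absurd h (by simp)
  | cons a t' ih =>
      cases zs with
      | nil =>
          simp only [List.cons_append, List.nil_append]
          constructor
          · intro h
            have : a = '.' := (List.cons_prefix_cons.mp h).1
            exact absurd this (by intro haa; exact ht (haa ▸ List.mem_cons_self))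
          · intro h; exact absurd h (by simp)
      | cons z zt =>
          have ht' : '.' ∉ t' := fun h => ht (List.mem_cons_of_mem _ h)
          have hz' : '.' ∉ zt := fun h => hz (List.mem_cons_of_mem _ h)
          simp only [List.cons_append, List.cons_prefix_cons, ih zt ht' hz']
          constructor
          · rintro ⟨h1, h2⟩; rw [h1, h2]
          · intro h; cases h; exact ⟨rfl, rfl⟩

-- endswith a '.key' on a string whose last dot splits it as ys ++ '.'::zs tests zs = key-tail
theorem pv_endswith_split (t ys zs : List Char) (ht : '.' ∉ t) (hz : '.' ∉ zs) :
    PySem.Chars.endswith (ys ++ '.' :: zs) ('.' :: t) = decide (zs = t) := by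
  by_cases h : zs = t
  · subst h
    have := (PySem.Chars.endswith_iff (ys ++ '.' :: zs) ('.' :: zs)).mpr ⟨ys, rfl⟩
    simp [this]
  · have hnot : ¬ (('.' :: t) <:+ (ys ++ '.' :: zs)) := by
      intro hsuf
      have hpre : ('.' :: t).reverse <+: (ys ++ '.' :: zs).reverse := List.reverse_prefix.mpr hsuf
      have hrev : (ys ++ '.' :: zs).reverse = zs.reverse ++ '.' :: ys.reverse := by simp
      rw [hrev] at hpre
      have hpre' : (t.reverse ++ ['.']) <+: (zs.reverse ++ '.' :: ys.reverse) := by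
        simpa using hpre
      have := (pv_suffix_key t.reverse zs.reverse ys.reverse (by simpa using ht) (by simpa using hz)).mp hpre'
      exact h (by simpa using (congrArg List.reverse this).symm)
    cases hE : PySem.Chars.endswith (ys ++ '.' :: zs) ('.' :: t) with
    | false => simp [h]
    | true => exact absurd ((PySem.Chars.endswith_iff _ _).mp hE) hnot

-- endswith a '.key' fails on a dotless string
theorem pv_endswith_nodot (t cs : List Char) (hc : '.' ∉ cs) :
    PySem.Chars.endswith cs ('.' :: t) = false := by
  cases hE : PySem.Chars.endswith cs ('.' :: t) with
  | false => rfl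
  | true =>
      have hsuf := (PySem.Chars.endswith_iff _ _).mp hE
      exact absurd (hsuf.mem List.mem_cons_self) hc

-- String.ofList is injective on the '.'-headed keys used below
theorem pv_key_eq (zs t : List Char) :
    (String.ofList ('.' :: t) = String.ofList ('.' :: zs)) ↔ zs = t := by
  constructor
  · intro h
    have := congrArg String.toList h
    simp at this
    exact this.symm
  · intro h; rw [h]

-- the core: A's table scan equals B's rfind/slice/lookup tail
theorem pv_core (symbol : String) :
    pvSuffixLoop symbol pvSuffixCurrency = pvAltTail symbol := by
  rcases pv_rfind_char symbol.toList with ⟨hr, hnd⟩ | ⟨ys, zs, heq, hz, hr⟩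
  · -- no dot in the symbol: every endswith fails; B looks up "" and defaults to "USD"
    have hE : ∀ t : List Char, PySem.Str.endswith symbol (String.ofList ('.' :: t)) = false := by
      intro t
      rw [PySem.Str.endswith_eq, show (String.ofList ('.' :: t)).toList = '.' :: t from by simp]
      exact pv_endswith_nodot t _ hnd
    have hloop : pvSuffixLoop symbol pvSuffixCurrency = "USD" := by
      simp only [pvSuffixLoop, pvSuffixCurrency,
        show (".T" : String) = String.ofList ['.','T'] from by decide,
        show (".SI" : String) = String.ofList ['.','S','I'] from by decide,
        show (".BK" : String) = String.ofList ['.','B','K'] from by decide,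
        show (".KL" : String) = String.ofList ['.','K','L'] from by decide,
        show (".JK" : String) = String.ofList ['.','J','K'] from by decide,
        show (".PS" : String) = String.ofList ['.','P','S'] from by decide,
        hE, Bool.false_eq_true, if_false]
    have halt : pvAltTail symbol = "USD" := by
      simp only [pvAltTail, PySem.Str.rfind_eq, show (".".toList) = ['.'] from by decide, hr]
      norm_num
      decide
    rw [hloop, halt]
  · -- symbol splits at its last dot as ys ++ '.'::zs
    have htl : symbol.toList = ys ++ '.' :: zs := heq
    have hidx : PySem.Str.rfind symbol "." = (ys.length : Int) := by
      rw [PySem.Str.rfind_eq, show (".".toList) = ['.'] from by decide]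
      exact hr
    have hslice : PySem.Str.slice symbol (some ((ys.length : Int))) none = String.ofList ('.' :: zs) := by
      unfold PySem.Str.slice PySem.Chars.slice
      rw [PySem.List.slice_from _ (by omega), htl]
      congr 1
      simp
    have halt : pvAltTail symbol = (PySem.Dict.mk pvSuffixCurrency).getD (String.ofList ('.' :: zs)) "USD" := by
      simp only [pvAltTail, hidx]
      rw [if_pos (by omega), hslice]
    have hes : ∀ t : List Char, '.' ∉ t →
        PySem.Str.endswith symbol (String.ofList ('.' :: t)) = decide (zs = t) := by
      intro t ht
      rw [PySem.Str.endswith_eq, htl, show (String.ofList ('.' :: t)).toList = '.' :: t from by simp]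
      exact pv_endswith_split t ys zs ht hz
    rw [halt]
    simp only [pvSuffixLoop, pvSuffixCurrency, PySem.Dict.getD_eq_get?_getD, PySem.Dict.get?_mk_cons,
      beq_iff_eq,
      show (".T" : String) = String.ofList ['.','T'] from by decide,
      show (".SI" : String) = String.ofList ['.','S','I'] from by decide,
      show (".BK" : String) = String.ofList ['.','B','K'] from by decide,
      show (".KL" : String) = String.ofList ['.','K','L'] from by decide,
      show (".JK" : String) = String.ofList ['.','J','K'] from by decide,
      show (".PS" : String) = String.ofList ['.','P','S'] from by decide]
    rw [hes ['T'] (by decide), hes ['S','I'] (by decide), hes ['B','K'] (by decide),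
        hes ['K','L'] (by decide), hes ['J','K'] (by decide), hes ['P','S'] (by decide)]
    simp only [pv_key_eq]
    by_cases h1 : zs = ['T'] <;> by_cases h2 : zs = ['S','I'] <;> by_cases h3 : zs = ['B','K'] <;>
      by_cases h4 : zs = ['K','L'] <;> by_cases h5 : zs = ['J','K'] <;> by_cases h6 : zs = ['P','S'] <;>
      simp_all [PySem.Dict.get?]

-- ===== VERDICT (by name: the statement is the Claim_ definition above) =====
theorem infer_currency_py_spec : Claim_equal_infer_currency_py := by
  intro symbol stock_info _
  unfold Spec_infer_currency_py infer_currency_py infer_currency_py_alt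
  cases (PySem.Dict.mk stock_info).get? "currency" with
  | none => exact pv_core symbol
  | some c =>
      by_cases h : c = "" <;> simp [h, pv_core symbol]
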